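-- pv_equiv track=rewrite | github.com/moshiyiqie/HeaderXtractor | py_scikit/StringManager.py | removeCharBetween
-- ===== SOURCE A (Python) =====
-- def removeCharBetween(str, leftOp,rightOp,removedCh):
-- 	s=[]
-- 	between = 0
-- 	for ch in str:
-- 		if ch == leftOp:
-- 			between += 1
-- 			s.append(ch)
-- 		elif ch == removedCh:
-- 			if between>0:
-- 				continue
-- 			else:
-- 				s.append(ch)
-- 		elif ch == rightOp:
-- 			between -= 1
-- 			s.append(ch)
-- 		else:
-- 			s.append(ch)
-- 	return ''.join(s)
-- ===== SOURCE B (Python) =====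
-- def removeCharBetween(str, leftOp, rightOp, removedCh):
--     # pass 1: depths[i] = bracket nesting level before character i
--     depths = []
--     d = 0
--     for ch in str:
--         depths.append(d)
--         if ch == leftOp:
--             d += 1
--         elif ch == rightOp:
--             d -= 1
--     # pass 2: drop removedCh wherever it sits inside a bracket pair
--     return ''.join(ch for ch, dep in zip(str, depths)
--                    if not (ch == removedCh and dep > 0))
-- ===== Notes on version B (the rewrite author's own statement) =====
-- stated objective: alternative
-- what changed: A's single streaming loop with a running counter and conditional appends is replaced by two passes (build a bracket-depth table, then zip-and-filter); Pre_ excludes inputs where a single-character removedCh occurring in str equals leftOp or rightOp, a degenerate corner where the removed char doubles as a bracket delimiter, the task is unspecified, and either value is defensible.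
-- outside the precondition, e.g. on removeCharBetween('(a(', '(', ')', '('): A returns '(a(', B returns '(a'; on removeCharBetween('(x)x)', '(', ')', ')'): A returns '(xx', B returns '(xx)'
import Mathlib
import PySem

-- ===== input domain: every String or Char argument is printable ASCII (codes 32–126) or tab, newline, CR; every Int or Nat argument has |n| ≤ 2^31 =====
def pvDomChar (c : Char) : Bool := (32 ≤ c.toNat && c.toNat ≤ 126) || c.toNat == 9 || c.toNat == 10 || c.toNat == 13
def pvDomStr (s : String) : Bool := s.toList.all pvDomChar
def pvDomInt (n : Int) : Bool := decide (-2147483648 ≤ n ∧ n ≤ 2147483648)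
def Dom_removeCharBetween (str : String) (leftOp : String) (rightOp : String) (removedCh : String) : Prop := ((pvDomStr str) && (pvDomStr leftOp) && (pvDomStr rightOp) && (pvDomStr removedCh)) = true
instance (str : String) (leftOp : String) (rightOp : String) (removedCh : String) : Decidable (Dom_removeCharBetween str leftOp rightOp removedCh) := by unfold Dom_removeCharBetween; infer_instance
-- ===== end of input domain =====

-- B replaces A's single streaming loop (running counter + conditional appends) by two passes:
-- a bracket-depth table, then a zip-and-filter pass; same O(n) cost, different decomposition.

-- ===== PORT A =====
-- one iteration of A's for-loop: state = (s, between)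
def pvStepA (leftOp rightOp removedCh : String) (acc : List Char × Int) (ch : Char) : List Char × Int :=
  if String.mk [ch] == leftOp then (acc.1 ++ [ch], acc.2 + 1)
  else if String.mk [ch] == removedCh then
    (if acc.2 > 0 then acc else (acc.1 ++ [ch], acc.2))
  else if String.mk [ch] == rightOp then (acc.1 ++ [ch], acc.2 - 1)
  else (acc.1 ++ [ch], acc.2)

def removeCharBetween (str : String) (leftOp : String) (rightOp : String) (removedCh : String) : String :=
  String.mk (str.toList.foldl (pvStepA leftOp rightOp removedCh) ([], 0)).1

-- ===== PORT B =====
-- pass 1: depths[i] = bracket nesting level before char i (leftOp +1, rightOp -1)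
def pvDepths (leftOp rightOp : String) : List Char → Int → List Int
  | [], _ => []
  | ch :: rest, d =>
    d :: pvDepths leftOp rightOp rest
      (if String.mk [ch] == leftOp then d + 1
       else if String.mk [ch] == rightOp then d - 1
       else d)

-- pass 2: drop (ch, dep) iff ch == removedCh and dep > 0
def pvKeepB (removedCh : String) (p : Char × Int) : Bool :=
  !((String.mk [p.1] == removedCh) && decide (0 < p.2))

def removeCharBetween_alt (str : String) (leftOp : String) (rightOp : String) (removedCh : String) : String :=
  String.mk ((List.filter (pvKeepB removedCh)
    (str.toList.zip (pvDepths leftOp rightOp str.toList 0))).map Prod.fst)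

-- ===== PRECONDITION & SPEC =====
-- Pre_ excludes the degenerate inputs where the (single-character, occurring-in-str) removedCh
-- coincides with leftOp or rightOp: there the character to remove doubles as a bracket delimiter,
-- the task is unspecified, and A's value and B's value are both defensible choices.
def Pre_removeCharBetween (str : String) (leftOp : String) (rightOp : String) (removedCh : String) : Prop :=
  (removedCh ≠ leftOp ∧ removedCh ≠ rightOp) ∨ removedCh.length ≠ 1 ∨
    ∀ c ∈ str.toList, String.mk [c] ≠ removedCh
instance (str : String) (leftOp : String) (rightOp : String) (removedCh : String) : Decidable (Pre_removeCharBetween str leftOp rightOp removedCh) := by unfold Pre_removeCharBetween; infer_instance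

def pvWitness_removeCharBetween : String × String × String × String := ("a(b)c", "(", ")", "b")

def Spec_removeCharBetween (str : String) (leftOp : String) (rightOp : String) (removedCh : String) (out : String) : Prop := out = removeCharBetween_alt str leftOp rightOp removedCh
instance (str : String) (leftOp : String) (rightOp : String) (removedCh : String) (out : String) : Decidable (Spec_removeCharBetween str leftOp rightOp removedCh out) := by unfold Spec_removeCharBetween; infer_instance

-- ===== CLAIM (what is proved, stated in full; the proofs are below) =====
def Claim_equal_removeCharBetween : Prop := ∀ (str : String) (leftOp : String) (rightOp : String) (removedCh : String), Dom_removeCharBetween str leftOp rightOp removedCh → Pre_removeCharBetween str leftOp rightOp removedCh → Spec_removeCharBetween str leftOp rightOp removedCh (removeCharBetween str leftOp rightOp removedCh)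

-- ===== LEMMAS AND PROOFS =====
-- loop invariant: A's fold from (s, d) appends exactly B's filtered zip of the rest at depth d,
-- provided every character of the rest that matches removedCh matches neither delimiter
theorem pvFoldA_eq (leftOp rightOp removedCh : String) :
    ∀ (l : List Char),
      (∀ c ∈ l, String.mk [c] = removedCh → removedCh ≠ leftOp ∧ removedCh ≠ rightOp) →
    ∀ (s : List Char) (d : Int),
      (l.foldl (pvStepA leftOp rightOp removedCh) (s, d)).1 =
        s ++ (List.filter (pvKeepB removedCh)
          (l.zip (pvDepths leftOp rightOp l d))).map Prod.fst := by
  intro l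
  induction l with
  | nil => intro _ s d; simp [pvDepths]
  | cons ch rest ih =>
    intro H s d
    have ih' := ih (fun c hc => H c (List.mem_cons_of_mem _ hc))
    by_cases hcL : String.mk [ch] = leftOp
    · have hcM : String.mk [ch] ≠ removedCh := fun h =>
        (H ch (List.mem_cons_self) h).1 (h ▸ hcL ▸ rfl)
      have hLM : leftOp ≠ removedCh := fun h => hcM (hcL.trans h)
      simp [pvDepths, pvStepA, List.filter_cons, pvKeepB, hcL, hcM, hLM, ih']
    · by_cases hcM : String.mk [ch] = removedCh
      · obtain ⟨hL, hR⟩ := H ch (List.mem_cons_self) hcM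
        have hcR : String.mk [ch] ≠ rightOp := fun h => hR (hcM ▸ h)
        by_cases hd : (0:Int) < d
        · simp [pvDepths, pvStepA, List.filter_cons, pvKeepB, hcL, hcM, hcR, hL, hR, hL.symm, hR.symm, hd, ih']
        · simp [pvDepths, pvStepA, List.filter_cons, pvKeepB, hcL, hcM, hcR, hL, hR, hL.symm, hR.symm, hd, ih']
      · by_cases hcR : String.mk [ch] = rightOp
        · have hRL : rightOp ≠ leftOp := fun h => hcL (h ▸ hcR)
          have hRM : rightOp ≠ removedCh := fun h => hcM (hcR ▸ h)
          simp [pvDepths, pvStepA, List.filter_cons, pvKeepB, hcL, hcM, hcR, hRL, hRM, ih']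
        · simp [pvDepths, pvStepA, List.filter_cons, pvKeepB, hcL, hcM, hcR, ih']

-- each Pre_ disjunct yields that hypothesis
theorem pvPre_imp (str leftOp rightOp removedCh : String)
    (h : Pre_removeCharBetween str leftOp rightOp removedCh) :
    ∀ c ∈ str.toList, String.mk [c] = removedCh → removedCh ≠ leftOp ∧ removedCh ≠ rightOp := by
  intro c hc he
  rcases h with h | h | h
  · exact h
  · exact absurd (by rw [← he]; show (String.ofList [c]).length = 1; simp : removedCh.length = 1) h
  · exact absurd he (h c hc)

-- ===== VERDICT (by name: the statement is the Claim_ definition above) =====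
theorem removeCharBetween_spec : Claim_equal_removeCharBetween := by
  intro str leftOp rightOp removedCh _ hPre
  unfold Spec_removeCharBetween removeCharBetween removeCharBetween_alt
  rw [pvFoldA_eq leftOp rightOp removedCh str.toList
    (pvPre_imp str leftOp rightOp removedCh hPre)]
  simp
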